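-- pv_equiv track=rewrite | github.com/eric-yanowitz/Codebreaking | nliteral_ciphers.py | triliteral_encoder
-- ===== SOURCE A (Python) =====
-- def triliteral_encoder(text = "", codeA = "", codeB = "", capitals = False, onlyletters = True, allcodes = False):
--     triliteral_string = ""
--     text = text.replace(' ', '')
--     codeA = codeA.replace(' ', '')
--     codeB = codeB.replace(' ', '')
--     if capitals == False:
--         text = text.lower()
--         codeA = codeA.lower()
--         codeB = codeB.lower()
--     if onlyletters == True:
--         text_temp = ""
--         codeA_temp = ""
--         codeB_temp = ""
--         for i in text:
--             if i.isalpha():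
--                 text_temp += i
--         for i in codeA:
--             if i.isalpha():
--                 codeA_temp += i
--         for i in codeB:
--             if i.isalpha():
--                 codeB_temp += i
--         text = text_temp
--         codeA = codeA_temp
--         codeB = codeB_temp
--     codeA = set(codeA)
--     codeB = set(codeB)
--     for i in text:
--         if i in codeA:
--             triliteral_string += 'a'
--         elif i in codeB:
--             triliteral_string += 'b'
--         else:
--             triliteral_string += 'c'
--     if allcodes == True:
--         t1 = triliteral_string
--         t2 = ""
--         t3 = ""
--         t4 = ""
--         t5 = ""
--         t6 = ""
--         for i in t1:
--             if i == 'a':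
--                 t2 += 'a'
--                 t3 += 'b'
--                 t4 += 'b'
--                 t5 += 'c'
--                 t6 += 'c'
--             elif i == 'b':
--                 t2 += 'c'
--                 t3 += 'a'
--                 t4 += 'c'
--                 t5 += 'a'
--                 t6 += 'b'
--             elif i == 'c':
--                 t2 += 'b'
--                 t3 += 'c'
--                 t4 += 'a'
--                 t5 += 'b'
--                 t6 += 'a'
--         triliteral_strings = [t1, t2, t3, t4, t5, t6]
--         return triliteral_strings
--     else:
--         return triliteral_string
-- ===== SOURCE B (Python) =====
-- def triliteral_encoder(text = "", codeA = "", codeB = "", capitals = False, onlyletters = True, allcodes = False):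
--     canon = (lambda c: c) if capitals else str.lower
--     keep = (lambda c: c != ' ' and c.isalpha()) if onlyletters else (lambda c: c != ' ')
--     setA = {canon(c) for c in codeA if keep(c)}
--     setB = {canon(c) for c in codeB if keep(c)}
--     # one category index per kept character: 0 -> in codeA, 1 -> in codeB, 2 -> neither
--     cats = [0 if canon(c) in setA else 1 if canon(c) in setB else 2
--             for c in text if keep(c)]
--     rows = ["abc", "acb", "bac", "bca", "cab", "cba"]
--     if allcodes:
--         return [''.join(row[k] for k in cats) for row in rows]
--     return ''.join(rows[0][k] for k in cats)
-- ===== Notes on version B (the rewrite author's own statement) =====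
-- stated objective: alternative
-- what changed: B never materializes A's normalized strings or the base a/b/c string: one fused filter-map pass turns each kept character into a category index 0/1/2, and every output letter (including all six allcodes variants) is read off a row of a 6x3 permutation table, replacing A's staged strip/lower/filter rewrites, set-membership string building and six parallel if-chain accumulators.
import Mathlib
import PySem

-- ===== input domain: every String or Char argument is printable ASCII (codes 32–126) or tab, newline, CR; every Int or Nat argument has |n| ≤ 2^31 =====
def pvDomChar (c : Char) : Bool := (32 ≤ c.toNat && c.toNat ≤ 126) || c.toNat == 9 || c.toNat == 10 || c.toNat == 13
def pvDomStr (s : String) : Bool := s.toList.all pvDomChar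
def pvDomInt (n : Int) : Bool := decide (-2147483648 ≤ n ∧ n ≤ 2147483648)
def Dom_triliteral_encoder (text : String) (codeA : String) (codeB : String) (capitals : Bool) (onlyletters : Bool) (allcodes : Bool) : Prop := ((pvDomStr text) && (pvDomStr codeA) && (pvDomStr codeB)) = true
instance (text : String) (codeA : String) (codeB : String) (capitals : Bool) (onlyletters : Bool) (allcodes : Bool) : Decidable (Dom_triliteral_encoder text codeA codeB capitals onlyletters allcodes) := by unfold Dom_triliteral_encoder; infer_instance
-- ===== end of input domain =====

-- B (objective: alternative): instead of A's staged string rewrites (strip/lower/filter copies per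
-- string, a base a/b/c string, six per-variant if-chain accumulators), B fuses normalization into one
-- filter-map pass, maps each kept character to a category index 0/1/2, and reads every output letter
-- off a row of a 6×3 permutation table.

-- ===== PORT A =====
-- literal transliteration of A on the String-returning branch (allcodes = false);
-- A's allcodes=true branch returns a list of six strings — not a String — and lies outside Pre_.
def triliteral_encoder (text : String) (codeA : String) (codeB : String) (capitals : Bool) (onlyletters : Bool) (allcodes : Bool) : String :=
  let text := (PySem.Str.replace text " " "").toList
  let codeA := (PySem.Str.replace codeA " " "").toList
  let codeB := (PySem.Str.replace codeB " " "").toList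
  let text := if capitals = false then PySem.Chars.lower text else text
  let codeA := if capitals = false then PySem.Chars.lower codeA else codeA
  let codeB := if capitals = false then PySem.Chars.lower codeB else codeB
  let text := if onlyletters = true then
      text.foldl (fun acc c => if PySem.Chars.isalpha c then acc ++ [c] else acc) [] else text
  let codeA := if onlyletters = true then
      codeA.foldl (fun acc c => if PySem.Chars.isalpha c then acc ++ [c] else acc) [] else codeA
  let codeB := if onlyletters = true then
      codeB.foldl (fun acc c => if PySem.Chars.isalpha c then acc ++ [c] else acc) [] else codeB
  let setA : PySem.Set Char := PySem.Set.ofList codeA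
  let setB : PySem.Set Char := PySem.Set.ofList codeB
  let tril := text.foldl (fun acc c =>
      if PySem.Set.contains setA c then acc ++ ['a']
      else if PySem.Set.contains setB c then acc ++ ['b']
      else acc ++ ['c']) []
  -- allcodes = true: Python returns [t1..t6], not a String — outside Pre_
  String.mk tril

-- ===== PORT B =====
-- Source B's canon: identity when capitals else str.lower, applied per character
def pvCanonB (capitals : Bool) (c : Char) : Char :=
  if capitals then c else PySem.Chars.lowerChar c

-- Source B's keep: drop spaces, and with onlyletters also non-letters
def pvKeepB (onlyletters : Bool) (c : Char) : Bool :=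
  if onlyletters then c != ' ' && PySem.Chars.isalpha c else c != ' '

-- Source B's set comprehension {canon(c) for c in s if keep(c)}
def pvCodeSetB (capitals : Bool) (onlyletters : Bool) (s : String) : PySem.Set Char :=
  PySem.Set.ofList ((s.toList.filter (pvKeepB onlyletters)).map (pvCanonB capitals))

def triliteral_encoder_alt (text : String) (codeA : String) (codeB : String) (capitals : Bool) (onlyletters : Bool) (allcodes : Bool) : String :=
  let setA := pvCodeSetB capitals onlyletters codeA
  let setB := pvCodeSetB capitals onlyletters codeB
  -- one category index per kept character: 0 -> codeA, 1 -> codeB, 2 -> neither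
  let cats : List Nat := (text.toList.filter (pvKeepB onlyletters)).map (fun c =>
      if PySem.Set.contains setA (pvCanonB capitals c) then 0
      else if PySem.Set.contains setB (pvCanonB capitals c) then 1
      else 2)
  let rows : List (List Char) := [['a','b','c'], ['a','c','b'], ['b','a','c'],
                                  ['b','c','a'], ['c','a','b'], ['c','b','a']]
  -- allcodes = true: Source B returns the six row-indexed strings (a list of str) — outside Pre_
  String.mk (cats.map (fun k => (rows.getD 0 []).getD k 'c'))

-- ===== PRECONDITION & SPEC =====
-- Pre_ excludes allcodes = true ONLY because there BOTH Pythons return a list[str] — not a value of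
-- the declared String return type, so that branch is not expressible here; B computes the same six
-- strings as A there (see the claim's cites).
def Pre_triliteral_encoder (text : String) (codeA : String) (codeB : String) (capitals : Bool) (onlyletters : Bool) (allcodes : Bool) : Prop := allcodes = false
instance (text : String) (codeA : String) (codeB : String) (capitals : Bool) (onlyletters : Bool) (allcodes : Bool) : Decidable (Pre_triliteral_encoder text codeA codeB capitals onlyletters allcodes) := by unfold Pre_triliteral_encoder; infer_instance

def pvWitness_triliteral_encoder : String × String × String × Bool × Bool × Bool := ("Hello World", "aeiou", "HLW", false, true, false)

def Spec_triliteral_encoder (text : String) (codeA : String) (codeB : String) (capitals : Bool) (onlyletters : Bool) (allcodes : Bool) (out : String) : Prop := out = triliteral_encoder_alt text codeA codeB capitals onlyletters allcodes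
instance (text : String) (codeA : String) (codeB : String) (capitals : Bool) (onlyletters : Bool) (allcodes : Bool) (out : String) : Decidable (Spec_triliteral_encoder text codeA codeB capitals onlyletters allcodes out) := by unfold Spec_triliteral_encoder; infer_instance

-- ===== CLAIM =====
def Claim_equal_triliteral_encoder : Prop := ∀ (text : String) (codeA : String) (codeB : String) (capitals : Bool) (onlyletters : Bool) (allcodes : Bool), Dom_triliteral_encoder text codeA codeB capitals onlyletters allcodes → Pre_triliteral_encoder text codeA codeB capitals onlyletters allcodes → Spec_triliteral_encoder text codeA codeB capitals onlyletters allcodes (triliteral_encoder text codeA codeB capitals onlyletters allcodes)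

-- ===== LEMMAS AND PROOFS =====

-- PySem.Chars.lowerChar sends letters to letters and non-letters to themselves
theorem isalpha_lowerChar (c : Char) : PySem.Chars.isalpha (PySem.Chars.lowerChar c) = PySem.Chars.isalpha c := by
  simp only [PySem.Chars.isalpha, PySem.Chars.lowerChar, PySem.Chars.isupper, PySem.Chars.islower]
  by_cases h : 'A' ≤ c ∧ c ≤ 'Z'
  · have h1 : 65 ≤ c.toNat := h.1
    have h2 : c.toNat ≤ 90 := h.2
    have ht : (Char.ofNat (c.toNat + 32)).toNat = c.toNat + 32 := by
      rw [Char.toNat_ofNat, if_pos (Or.inl (by omega))]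
    have ha : ('a' ≤ Char.ofNat (c.toNat + 32)) := show 97 ≤ (Char.ofNat (c.toNat + 32)).toNat by omega
    have hb : (Char.ofNat (c.toNat + 32) ≤ 'z') := show (Char.ofNat (c.toNat + 32)).toNat ≤ 122 by omega
    simp [h.1, h.2, ha, hb]
  · have hb : (decide ('A' ≤ c) && decide (c ≤ 'Z')) = false := by
      rcases Decidable.not_and_iff_not_or_not.mp h with h' | h' <;> simp [h']
    simp [hb]

-- s.replace(' ', '') keeps exactly the non-space characters (worker of PySem.Chars.replace
-- specialised to a one-character pattern and empty replacement)
theorem replace_go_single (o : Char) : ∀ (l acc : List Char) (fuel : Nat), l.length ≤ fuel →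
    PySem.Chars.replace.go [o] [] fuel l acc = acc.reverse ++ l.filter (· != o) := by
  intro l
  induction l with
  | nil => intro acc fuel _; cases fuel <;> simp [PySem.Chars.replace.go]
  | cons c t ih =>
    intro acc fuel hf
    cases fuel with
    | zero => simp at hf
    | succ n =>
      simp only [PySem.Chars.replace.go]
      by_cases hc : c = o
      · subst hc
        rw [if_pos (by simp [List.isPrefixOf])]
        simp only [List.length_cons] at hf
        rw [show ([c].length) = 1 from rfl]
        simp only [List.drop_one, List.tail_cons, List.reverse_nil, List.nil_append]
        rw [ih acc n (by omega)]
        simp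
      · rw [if_neg (by simp [List.isPrefixOf]; exact fun h => (hc h.symm).elim)]
        rw [ih (c :: acc) n (by simpa using Nat.le_of_succ_le_succ hf)]
        simp [hc]

theorem replace_space_eq_filter (s : List Char) :
    PySem.Chars.replace s [' '] [] = s.filter (· != ' ') := by
  rw [PySem.Chars.replace]
  simp only [List.isEmpty_cons, Bool.false_eq_true, if_false]
  rw [replace_go_single ' ' s [] s.length le_rfl]
  simp

-- A's staged normalization (strip spaces, optional lower, optional isalpha filter)
-- equals B's single fused filter-then-map pass
theorem pvNorm_eq (capitals onlyletters : Bool) (s : String) :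
    (if onlyletters = true then
      (if capitals = false then PySem.Chars.lower (PySem.Str.replace s " " "").toList
       else (PySem.Str.replace s " " "").toList).foldl
        (fun acc c => if PySem.Chars.isalpha c then acc ++ [c] else acc) []
     else
      (if capitals = false then PySem.Chars.lower (PySem.Str.replace s " " "").toList
       else (PySem.Str.replace s " " "").toList)) =
    (s.toList.filter (pvKeepB onlyletters)).map (pvCanonB capitals) := by
  have hrep : (PySem.Str.replace s " " "").toList = s.toList.filter (· != ' ') := by
    rw [PySem.Str.toList_replace]
    exact replace_space_eq_filter s.toList
  have hcF : pvCanonB false = PySem.Chars.lowerChar := rfl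
  have hcT : pvCanonB true = fun c => c := rfl
  have hkF : pvKeepB false = (fun c => c != ' ') := rfl
  have hkT : pvKeepB true = (fun c => c != ' ' && PySem.Chars.isalpha c) := rfl
  cases capitals <;> cases onlyletters <;>
    simp [hrep, hcF, hcT, hkF, hkT, PySem.Chars.lower, PySem.List.foldl_append_if_eq_filter,
          List.filter_map, List.filter_filter, Function.comp, isalpha_lowerChar, Bool.and_comm]

-- A's classification loop produces B's row-0 letter for B's category index, character by character
theorem pvClassify_eq (setA setB : PySem.Set Char) (l : List Char) :
    l.foldl (fun acc c =>
      if PySem.Set.contains setA c then acc ++ ['a']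
      else if PySem.Set.contains setB c then acc ++ ['b']
      else acc ++ ['c']) [] =
    (l.map (fun c => if PySem.Set.contains setA c then (0 : Nat)
                     else if PySem.Set.contains setB c then 1 else 2)).map
      (fun k => (([['a','b','c'], ['a','c','b'], ['b','a','c'],
                  ['b','c','a'], ['c','a','b'], ['c','b','a']] : List (List Char)).getD 0 []).getD k 'c') := by
  rw [List.map_map]
  have h : ∀ (acc : List Char) (c : Char),
      (if PySem.Set.contains setA c then acc ++ ['a']
       else if PySem.Set.contains setB c then acc ++ ['b']
       else acc ++ ['c']) =
      acc ++ [(([['a','b','c'], ['a','c','b'], ['b','a','c'],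
                ['b','c','a'], ['c','a','b'], ['c','b','a']] : List (List Char)).getD 0 []).getD
                (if PySem.Set.contains setA c then (0 : Nat)
                 else if PySem.Set.contains setB c then 1 else 2) 'c'] := by
    intro acc c; split_ifs <;> rfl
  calc l.foldl (fun acc c =>
        if PySem.Set.contains setA c then acc ++ ['a']
        else if PySem.Set.contains setB c then acc ++ ['b']
        else acc ++ ['c']) []
      = l.foldl (fun acc c => acc ++
          [(([['a','b','c'], ['a','c','b'], ['b','a','c'],
             ['b','c','a'], ['c','a','b'], ['c','b','a']] : List (List Char)).getD 0 []).getD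
             (if PySem.Set.contains setA c then (0 : Nat)
              else if PySem.Set.contains setB c then 1 else 2) 'c']) [] := by
        congr 1; funext acc c; exact h acc c
    _ = _ := by rw [PySem.List.foldl_append_singleton_eq_map, List.nil_append]; rfl

-- ===== VERDICT =====
theorem triliteral_encoder_spec : Claim_equal_triliteral_encoder := by
  intro text codeA codeB capitals onlyletters allcodes _ _
  show triliteral_encoder text codeA codeB capitals onlyletters allcodes
      = triliteral_encoder_alt text codeA codeB capitals onlyletters allcodes
  simp only [triliteral_encoder, triliteral_encoder_alt, pvCodeSetB, pvNorm_eq, pvClassify_eq,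
      List.map_map, Function.comp]
  rfl
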